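-- pv_equiv track=rewrite | github.com/v-liuwei/optimization-ustc2023spring | utils.py | label_str
-- ===== SOURCE A (Python) =====
-- def label_str(s: str, label: str) -> str:
--     """Add label to a string at its center left."""
--     from math import ceil
--     l_lines = label.split('\n')
--     nl = len(l_lines)
--     lw = max(len(l) for l in l_lines)
--     s_lines = s.split('\n')
--     ns = len(s_lines)
--
--     nr = max(nl, ns)
--     lines = []
--     for i in range(nr):
--         line = ''
--         if ceil((nr - nl) / 2) <= i < ceil((nr + nl) / 2):
--             line += l_lines[i - ceil((nr - nl) / 2)].ljust(lw)
--         else: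
--             line += ' ' * lw
--         if ceil((nr - ns) / 2) <= i < ceil((nr + ns) / 2):
--             line += s_lines[i - ceil((nr - ns) / 2)]
--         lines.append(line)
--     return '\n'.join(lines)
-- ===== SOURCE B (Python) =====
-- def label_str(s: str, label: str) -> str:
--     """Add label to a string at its center left."""
--     def center(block, total, blank):
--         top = (total - len(block) + 1) // 2
--         return [blank] * top + block + [blank] * (total - len(block) - top)
--
--     l_lines = label.split('\n')
--     lw = max(len(l) for l in l_lines)
--     s_lines = s.split('\n')
--     nr = max(len(l_lines), len(s_lines))
--     label_col = center([l.ljust(lw) for l in l_lines], nr, ' ' * lw)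
--     str_col = center(s_lines, nr, '')
--     return '\n'.join(lc + sc for lc, sc in zip(label_col, str_col))
-- ===== Notes on version B (the rewrite author's own statement) =====
-- stated objective: simpler
-- what changed: B replaces A's per-row loop with ceil-bounded window tests and per-row branch arithmetic by a center() helper that builds each padded column whole (top blanks + rows + bottom blanks) and then zips the two columns row-wise.
import Mathlib
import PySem

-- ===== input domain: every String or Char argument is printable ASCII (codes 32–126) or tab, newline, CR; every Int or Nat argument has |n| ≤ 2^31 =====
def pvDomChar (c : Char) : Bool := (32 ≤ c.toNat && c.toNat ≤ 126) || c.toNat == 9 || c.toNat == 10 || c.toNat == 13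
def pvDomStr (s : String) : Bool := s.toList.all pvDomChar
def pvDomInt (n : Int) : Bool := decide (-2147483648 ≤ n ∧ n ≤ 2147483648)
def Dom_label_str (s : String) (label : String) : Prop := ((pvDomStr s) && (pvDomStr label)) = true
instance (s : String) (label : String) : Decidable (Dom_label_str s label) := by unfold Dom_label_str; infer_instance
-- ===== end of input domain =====

-- B (label_str_alt) builds the two centered columns whole (blank padding + rows + blank padding)
-- and zips them, instead of A's per-row loop with ceil-bounded window tests: objective = simpler decomposition.

-- ===== PORT A =====
-- math.ceil(x / 2) on an int x: exact as -((-x) // 2) (float division is exact at these magnitudes)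
def pyCeilHalf (x : Int) : Int := -(PySem.Int.floordiv (-x) 2)
-- str.ljust(w) with the default fill ' ', on List Char (hand port, exact: pad right to width w)
def ljustC (cs : List Char) (w : Int) : List Char := cs ++ List.replicate (w - (cs.length : Int)).toNat ' '

def label_str (s : String) (label : String) : String :=
  let l_lines := PySem.Chars.splitOn label.toList ['\n']
  let nl : Int := l_lines.length
  let lw : Int := (PySem.List.max? (l_lines.map (fun l => (l.length : Int))) (fun y => y)).getD 0
  let s_lines := PySem.Chars.splitOn s.toList ['\n']
  let ns : Int := s_lines.length
  let nr : Int := max nl ns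
  let lines := (PySem.List.pyRange 0 nr 1).foldl (fun acc i =>
    let line : List Char :=
      if pyCeilHalf (nr - nl) ≤ i ∧ i < pyCeilHalf (nr + nl) then
        ljustC (PySem.List.pyGetD l_lines (i - pyCeilHalf (nr - nl)) []) lw
      else List.replicate lw.toNat ' '
    let line := line ++
      (if pyCeilHalf (nr - ns) ≤ i ∧ i < pyCeilHalf (nr + ns) then
        PySem.List.pyGetD s_lines (i - pyCeilHalf (nr - ns)) []
      else [])
    acc ++ [line]) []
  String.ofList (PySem.Chars.join ['\n'] lines)

-- ===== PORT B =====
-- center(block, total, blank): top blanks, the block, bottom blanks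
def centerB (block : List (List Char)) (total : Int) (blank : List Char) : List (List Char) :=
  let top := PySem.Int.floordiv (total - (block.length : Int) + 1) 2
  List.replicate top.toNat blank ++ block ++ List.replicate (total - (block.length : Int) - top).toNat blank

def label_str_alt (s : String) (label : String) : String :=
  let l_lines := PySem.Chars.splitOn label.toList ['\n']
  let lw : Int := (PySem.List.max? (l_lines.map (fun l => (l.length : Int))) (fun y => y)).getD 0
  let s_lines := PySem.Chars.splitOn s.toList ['\n']
  let nr : Int := max (l_lines.length : Int) (s_lines.length : Int)
  let label_col := centerB (l_lines.map (fun l => ljustC l lw)) nr (List.replicate lw.toNat ' ')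
  let str_col := centerB s_lines nr []
  String.ofList (PySem.Chars.join ['\n'] (List.zipWith (· ++ ·) label_col str_col))

-- ===== PRECONDITION & SPEC =====
def Spec_label_str (s : String) (label : String) (out : String) : Prop := out = label_str_alt s label
instance (s : String) (label : String) (out : String) : Decidable (Spec_label_str s label out) := by unfold Spec_label_str; infer_instance

-- ===== CLAIM (what is proved, stated in full; the proofs are below) =====
def Claim_equal_label_str : Prop := ∀ (s : String) (label : String), Dom_label_str s label → Spec_label_str s label (label_str s label)

-- ===== LEMMAS AND PROOFS =====

theorem foldl_app {α β : Type} (g : α → β) (l : List α) (init : List β) :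
    l.foldl (fun acc i => acc ++ [g i]) init = init ++ l.map g := by
  induction l generalizing init with
  | nil => simp
  | cons x t ih => simp [List.foldl_cons, ih]

theorem centerB_length (block : List (List Char)) (total : Int) (blank : List Char)
    (hle : (block.length : Int) ≤ total) :
    (centerB block total blank).length = total.toNat := by
  unfold centerB
  rw [PySem.Int.floordiv_eq_ediv_of_pos (by norm_num)]
  simp only [List.length_append, List.length_replicate]
  omega

-- element k of a centered column, written exactly as A's per-row branch
theorem col_eq (B : List (List Char)) (f : List Char → List Char) (total : Int)
    (blank : List Char) (hbl : blank = f []) (hle : (B.length : Int) ≤ total) (k : Nat)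
    (hkk : k < (centerB (B.map f) total blank).length) :
    (centerB (B.map f) total blank)[k] =
      (if pyCeilHalf (total - B.length) ≤ (k : Int) ∧ (k : Int) < pyCeilHalf (total + B.length)
       then f (PySem.List.pyGetD B ((k : Int) - pyCeilHalf (total - B.length)) [])
       else blank) := by
  subst hbl
  have hc : centerB (List.map f B) total (f []) =
      List.replicate ((total - (B.length : Int) + 1) / 2).toNat (f []) ++ List.map f B ++
        List.replicate (total - (B.length : Int) - (total - (B.length : Int) + 1) / 2).toNat (f []) := by
    unfold centerB
    rw [PySem.Int.floordiv_eq_ediv_of_pos (by norm_num)]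
    simp
  have hceil1 : pyCeilHalf (total - (B.length : Int)) = (total - (B.length : Int) + 1) / 2 := by
    unfold pyCeilHalf
    rw [PySem.Int.floordiv_eq_ediv_of_pos (by norm_num)]
    omega
  have hceil2 : pyCeilHalf (total + (B.length : Int)) = (total - (B.length : Int) + 1) / 2 + B.length := by
    unfold pyCeilHalf
    rw [PySem.Int.floordiv_eq_ediv_of_pos (by norm_num)]
    omega
  rw [hc] at hkk
  simp only [List.length_append, List.length_replicate, List.length_map] at hkk
  simp only [hc]
  by_cases h : pyCeilHalf (total - (B.length : Int)) ≤ (k : Int) ∧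
      (k : Int) < pyCeilHalf (total + (B.length : Int))
  · rw [if_pos h]
    obtain ⟨h1, h2⟩ := h
    rw [List.getElem_append_left (by (try simp only [List.length_append, List.length_replicate, List.length_map]); omega)]
    rw [List.getElem_append_right (by (try simp only [List.length_append, List.length_replicate, List.length_map]); omega)]
    rw [List.getElem_map]
    rw [PySem.List.pyGetD_eq_getElem B [] (by omega) (by omega)]
    simp only [List.length_replicate]
    have hidx : k - ((total - (B.length : Int) + 1) / 2).toNat
        = ((k : Int) - pyCeilHalf (total - (B.length : Int))).toNat := by omega
    simp only [hidx]
  · rw [if_neg h]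
    rw [Decidable.not_and_iff_or_not] at h
    by_cases hlt : k < ((total - (B.length : Int) + 1) / 2).toNat
    · rw [List.getElem_append_left (by (try simp only [List.length_append, List.length_replicate, List.length_map]); omega)]
      rw [List.getElem_append_left (by (try simp only [List.length_append, List.length_replicate, List.length_map]); omega)]
      simp
    · rw [List.getElem_append_right (by (try simp only [List.length_append, List.length_replicate, List.length_map]); omega)]
      simp

-- the per-row loop of A builds exactly the zip of the two centered columns of B
theorem lines_eq (L S : List (List Char)) (lw : Int) :
    (PySem.List.pyRange 0 (max (L.length : Int) (S.length : Int)) 1).foldl (fun acc i =>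
      let line : List Char :=
        if pyCeilHalf (max (L.length : Int) (S.length : Int) - L.length) ≤ i ∧
            i < pyCeilHalf (max (L.length : Int) (S.length : Int) + L.length) then
          ljustC (PySem.List.pyGetD L (i - pyCeilHalf (max (L.length : Int) (S.length : Int) - L.length)) []) lw
        else List.replicate lw.toNat ' '
      let line := line ++
        (if pyCeilHalf (max (L.length : Int) (S.length : Int) - S.length) ≤ i ∧
            i < pyCeilHalf (max (L.length : Int) (S.length : Int) + S.length) then
          PySem.List.pyGetD S (i - pyCeilHalf (max (L.length : Int) (S.length : Int) - S.length)) []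
        else [])
      acc ++ [line]) []
    = List.zipWith (· ++ ·)
        (centerB (L.map (fun l => ljustC l lw)) (max (L.length : Int) (S.length : Int)) (List.replicate lw.toNat ' '))
        (centerB S (max (L.length : Int) (S.length : Int)) []) := by
  set nr : Int := max (L.length : Int) (S.length : Int) with hnr
  have hL : (L.length : Int) ≤ nr := le_max_left _ _
  have hS : (S.length : Int) ≤ nr := le_max_right _ _
  have hblankL : List.replicate lw.toNat ' ' = (fun l => ljustC l lw) ([] : List Char) := by
    simp [ljustC]
  have hblankS : ([] : List Char) = (fun l => l) ([] : List Char) := rfl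
  rw [foldl_app, List.nil_append, PySem.List.pyRange_one]
  rw [List.map_map]
  have hlenL := centerB_length (L.map (fun l => ljustC l lw)) nr (List.replicate lw.toNat ' ') (by simpa using hL)
  have hlenS := centerB_length S nr [] hS
  apply List.ext_getElem
  · simp [List.length_zipWith, hlenL, hlenS]
  · intro k h1 h2
    simp only [List.getElem_map, List.getElem_range, Function.comp_apply]
    rw [List.getElem_zipWith]
    simp only [List.length_map, List.length_range] at h1
    have hk : (k : Int) < nr := by omega
    have e1 := col_eq L (fun l => ljustC l lw) nr (List.replicate lw.toNat ' ') hblankL hL k (by omega)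
    have e2 := col_eq S (fun l => l) nr [] hblankS hS k (by simp only [List.map_id']; omega)
    simp only [List.map_id'] at e2
    simp only [zero_add]
    simp only [e1, e2]

-- ===== VERDICT (by name: the statement is the Claim_ definition above) =====
theorem label_str_spec : Claim_equal_label_str := by
  intro s label _
  unfold Spec_label_str label_str label_str_alt
  exact congrArg (fun l => String.ofList (PySem.Chars.join ['\n'] l)) (lines_eq _ _ _)
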